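-- pv_equiv track=rewrite | github.com/idrakseyfullayev/filmproject | filmpr/account/views.py | has_num_alpha_symbol
-- ===== SOURCE A (Python) =====
-- def has_num_alpha_symbol(t):
--     num = "0123456789"
--     alpha = "abcdefghijklmnopqrstuvwxyz"
--     symbol = "~!@#$%^&*()_+:|\\/?><.,"
--     x = False
--     y = False
--     z = False
--     for i in t:
--         if i in num:
--             x = True
--         if i in alpha:
--             y = True
--         if i in symbol:
--             z = True
--         if x and y and z:
--                 break
--     if x and y and z:
--         return True
--     else:
--         return False
-- ===== SOURCE B (Python) =====
-- def has_num_alpha_symbol(t):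
--     num = "0123456789"
--     alpha = "abcdefghijklmnopqrstuvwxyz"
--     symbol = "~!@#$%^&*()_+:|\\/?><.,"
--     return (any(c in num for c in t)
--             and any(c in alpha for c in t)
--             and any(c in symbol for c in t))
-- ===== Notes on version B (the rewrite author's own statement) =====
-- stated objective: idiomatic
-- what changed: Replaced the single fused flag-setting loop with early break by three independent short-circuiting any() membership scans, one per character class.
import Mathlib
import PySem

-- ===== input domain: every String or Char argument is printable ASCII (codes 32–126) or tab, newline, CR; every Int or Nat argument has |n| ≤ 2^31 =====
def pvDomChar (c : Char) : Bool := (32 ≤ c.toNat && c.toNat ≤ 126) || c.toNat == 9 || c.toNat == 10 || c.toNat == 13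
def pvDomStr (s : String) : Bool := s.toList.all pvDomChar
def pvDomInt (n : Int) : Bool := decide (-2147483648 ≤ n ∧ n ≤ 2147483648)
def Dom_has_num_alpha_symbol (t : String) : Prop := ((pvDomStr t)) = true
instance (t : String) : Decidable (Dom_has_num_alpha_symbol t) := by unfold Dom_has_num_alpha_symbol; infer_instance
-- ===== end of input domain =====

-- B replaces A's single fused flag-setting loop (with early break) by three
-- independent short-circuiting membership scans, one per character class (idiomatic).


-- ===== PORT A =====
-- the three character-class constants of A (shared literals; both ports use the same classes)
def pvNum : List Char := "0123456789".toList
def pvAlpha : List Char := "abcdefghijklmnopqrstuvwxyz".toList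
def pvSymbol : List Char := "~!@#$%^&*()_+:|\\/?><.,".toList

-- A's loop: three flags, updated per character, early break once all three hold
def pvLoopA : List Char → Bool → Bool → Bool → Bool
  | [], x, y, z => x && y && z
  | c :: cs, x, y, z =>
    let x' := if pvNum.contains c then true else x
    let y' := if pvAlpha.contains c then true else y
    let z' := if pvSymbol.contains c then true else z
    if x' && y' && z' then true else pvLoopA cs x' y' z'

def has_num_alpha_symbol (t : String) : Bool :=
  pvLoopA t.toList false false false

-- ===== PORT B =====
def has_num_alpha_symbol_alt (t : String) : Bool :=
  t.toList.any (fun c => pvNum.contains c)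
    && t.toList.any (fun c => pvAlpha.contains c)
    && t.toList.any (fun c => pvSymbol.contains c)

-- ===== PRECONDITION & SPEC =====
def Spec_has_num_alpha_symbol (t : String) (out : Bool) : Prop := out = has_num_alpha_symbol_alt t
instance (t : String) (out : Bool) : Decidable (Spec_has_num_alpha_symbol t out) := by unfold Spec_has_num_alpha_symbol; infer_instance

-- ===== CLAIM (what is proved, stated in full; the proofs are below) =====
def Claim_equal_has_num_alpha_symbol : Prop := ∀ (t : String), Dom_has_num_alpha_symbol t → Spec_has_num_alpha_symbol t (has_num_alpha_symbol t)

-- ===== LEMMAS AND PROOFS =====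
theorem pvLoopA_char (l : List Char) (x y z : Bool) :
    pvLoopA l x y z =
      ((x || l.any (fun c => pvNum.contains c))
        && (y || l.any (fun c => pvAlpha.contains c))
        && (z || l.any (fun c => pvSymbol.contains c))) := by
  induction l generalizing x y z with
  | nil => simp [pvLoopA]
  | cons c cs ih =>
    simp only [pvLoopA, List.any_cons, ih]
    by_cases hn : c ∈ pvNum <;>
      by_cases ha : c ∈ pvAlpha <;>
        by_cases hs : c ∈ pvSymbol <;>
          simp [List.contains_eq_mem, hn, ha, hs] <;>
            cases x <;> cases y <;> cases z <;> simp [hn, ha, hs]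

-- ===== VERDICT (by name: the statement is the Claim_ definition above) =====
theorem has_num_alpha_symbol_spec : Claim_equal_has_num_alpha_symbol := by
  intro t _
  unfold Spec_has_num_alpha_symbol has_num_alpha_symbol has_num_alpha_symbol_alt
  simp [pvLoopA_char]
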